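-- pv_equiv track=rewrite | github.com/pypi-data/pypi-mirror-98 | packages/reactionary/reactionary-0.4-py2.py3-none-any.whl/reactionary/reactionary_lib.py | select_most_specific_annotation_v2
-- ===== SOURCE A (Python) =====
-- def select_most_specific_annotation_v2(raw_ogs,best_og,eggnog2rxns):
--     ## First, see if the 'best' hit is in our annotation set:
--     if best_og in eggnog2rxns:
--         return best_og
--
--     ## Try to find a specific NOG that has a hit in our annotationset:
--     for og in raw_ogs:
--         og_id = og.split('@')[0]
--         og_level = og.split('@')[1]
--         if not og_id.startswith('COG') and og_level not in ['bactNOG', 'euNOG', 'arNOG'] and ('ENOG41'+og_id) in eggnog2rxns: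
--             return 'ENOG41'+og_id
--
--     ## If no specific hits, try to find a kingdom-level hit:
--     for og in raw_ogs:
--         og_id = og.split('@')[0]
--         og_level = og.split('@')[1]
--         if not og_id.startswith('COG') and og_level in ['bactNOG', 'euNOG', 'arNOG'] and ('ENOG41'+og_id) in eggnog2rxns:
--             return 'ENOG41'+og_id
--
--     ## If all else fails, try to find a COG-level hit:
--     for og in raw_ogs:
--         og_id = og.split('@')[0]
--         og_level = og.split('@')[1]
--         if og_id.startswith('COG') and og_id in eggnog2rxns:
--             return og_id
--
--     ## If nothing has a hit in the eggnog2rxns hash, then just return the 'best' hit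
--     return best_og
-- ===== SOURCE B (Python) =====
-- def select_most_specific_annotation_v2(raw_ogs, best_og, eggnog2rxns):
--     ## If the 'best' hit is annotated, it wins outright.
--     if best_og in eggnog2rxns:
--         return best_og
--
--     ## One pass: return the first specific NOG hit immediately; remember the
--     ## first kingdom-level hit and the first COG-level hit as fallbacks.
--     kingdom_fb = None
--     cog_fb = None
--     for og in raw_ogs:
--         parts = og.split('@')
--         og_id = parts[0]
--         og_level = parts[1]
--         if og_id.startswith('COG'):
--             if cog_fb is None and og_id in eggnog2rxns:
--                 cog_fb = og_id
--         elif og_level in ('bactNOG', 'euNOG', 'arNOG'):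
--             if kingdom_fb is None and ('ENOG41' + og_id) in eggnog2rxns:
--                 kingdom_fb = 'ENOG41' + og_id
--         elif ('ENOG41' + og_id) in eggnog2rxns:
--             return 'ENOG41' + og_id
--
--     if kingdom_fb is not None:
--         return kingdom_fb
--     if cog_fb is not None:
--         return cog_fb
--     return best_og
-- ===== Notes on version B (the rewrite author's own statement) =====
-- stated objective: faster
-- what changed: Replaces A's three separate full scans of raw_ogs (specific, then kingdom, then COG pass) by a single pass that returns a specific hit immediately and records the first kingdom-level and first COG-level candidates in two never-overwritten fallback variables.
-- outside the precondition, e.g. on select_most_specific_annotation_v2(['X@NOG', 'bad'], 'b', {'ENOG41X': []}): A returns 'ENOG41X', B returns 'ENOG41X'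
import Mathlib
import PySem

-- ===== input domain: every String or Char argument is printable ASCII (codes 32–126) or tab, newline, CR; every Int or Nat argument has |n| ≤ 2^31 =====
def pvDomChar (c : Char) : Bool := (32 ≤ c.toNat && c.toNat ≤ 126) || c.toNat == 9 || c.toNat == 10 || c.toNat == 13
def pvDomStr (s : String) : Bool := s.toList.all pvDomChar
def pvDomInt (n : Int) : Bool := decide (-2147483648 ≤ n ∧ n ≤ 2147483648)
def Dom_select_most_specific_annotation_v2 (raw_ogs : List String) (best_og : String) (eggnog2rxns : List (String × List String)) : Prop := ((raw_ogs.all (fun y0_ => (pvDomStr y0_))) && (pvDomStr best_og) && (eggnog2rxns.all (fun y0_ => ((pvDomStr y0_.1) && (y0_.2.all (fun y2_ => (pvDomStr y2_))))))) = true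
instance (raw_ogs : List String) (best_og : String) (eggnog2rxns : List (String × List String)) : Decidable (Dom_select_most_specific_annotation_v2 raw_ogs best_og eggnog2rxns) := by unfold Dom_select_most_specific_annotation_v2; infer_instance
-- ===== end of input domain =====

-- B replaces A's three successive full scans of raw_ogs by one pass with two first-match
-- fallback variables; equivalence is proved on inputs where every og contains '@' (or best_og
-- is annotated). (One pass vs up to three passes: a constant-factor change, same O(n).)


-- shared trivial helper: 'k in d' for a Python dict (key membership)
def pvHasKey (d : List (String × List String)) (k : String) : Bool :=
  d.any (fun kv => kv.1 == k)

-- ===== PORT A =====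
-- A's first loop: first og that is a specific NOG hit ('[1]' of the split is read
-- unconditionally in Python; ported with pyGetD, the IndexError case is outside Pre_).
def pvFindSpec (eg : List (String × List String)) : List String → Option String
  | [] => none
  | og :: rest =>
    let parts := (PySem.Str.split? og "@").getD []
    let og_id := PySem.List.pyGetD parts 0 ""
    let og_level := PySem.List.pyGetD parts 1 ""
    if !PySem.Str.startswith og_id "COG"
        && !(og_level == "bactNOG" || og_level == "euNOG" || og_level == "arNOG")
        && pvHasKey eg ("ENOG41" ++ og_id) then
      some ("ENOG41" ++ og_id)
    else pvFindSpec eg rest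

-- A's second loop: first kingdom-level hit
def pvFindKing (eg : List (String × List String)) : List String → Option String
  | [] => none
  | og :: rest =>
    let parts := (PySem.Str.split? og "@").getD []
    let og_id := PySem.List.pyGetD parts 0 ""
    let og_level := PySem.List.pyGetD parts 1 ""
    if !PySem.Str.startswith og_id "COG"
        && (og_level == "bactNOG" || og_level == "euNOG" || og_level == "arNOG")
        && pvHasKey eg ("ENOG41" ++ og_id) then
      some ("ENOG41" ++ og_id)
    else pvFindKing eg rest

-- A's third loop: first COG-level hit
def pvFindCog (eg : List (String × List String)) : List String → Option String
  | [] => none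
  | og :: rest =>
    let parts := (PySem.Str.split? og "@").getD []
    let og_id := PySem.List.pyGetD parts 0 ""
    let _og_level := PySem.List.pyGetD parts 1 ""
    if PySem.Str.startswith og_id "COG" && pvHasKey eg og_id then
      some og_id
    else pvFindCog eg rest

def select_most_specific_annotation_v2 (raw_ogs : List String) (best_og : String) (eggnog2rxns : List (String × List String)) : String :=
  if pvHasKey eggnog2rxns best_og then best_og
  else
    match pvFindSpec eggnog2rxns raw_ogs with
    | some v => v
    | none =>
      match pvFindKing eggnog2rxns raw_ogs with
      | some v => v
      | none =>
        match pvFindCog eggnog2rxns raw_ogs with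
        | some v => v
        | none => best_og

-- ===== PORT B =====
-- B's single loop, carrying the two never-overwritten fallbacks
def pvOnePass (eg : List (String × List String)) (best_og : String) :
    List String → Option String → Option String → String
  | [], kingdom_fb, cog_fb =>
    match kingdom_fb with
    | some v => v
    | none =>
      match cog_fb with
      | some v => v
      | none => best_og
  | og :: rest, kingdom_fb, cog_fb =>
    let parts := (PySem.Str.split? og "@").getD []
    let og_id := PySem.List.pyGetD parts 0 ""
    let og_level := PySem.List.pyGetD parts 1 ""
    if PySem.Str.startswith og_id "COG" then
      pvOnePass eg best_og rest kingdom_fb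
        (if cog_fb == none && pvHasKey eg og_id then some og_id else cog_fb)
    else if og_level == "bactNOG" || og_level == "euNOG" || og_level == "arNOG" then
      pvOnePass eg best_og rest
        (if kingdom_fb == none && pvHasKey eg ("ENOG41" ++ og_id) then some ("ENOG41" ++ og_id) else kingdom_fb)
        cog_fb
    else if pvHasKey eg ("ENOG41" ++ og_id) then
      "ENOG41" ++ og_id
    else pvOnePass eg best_og rest kingdom_fb cog_fb

def select_most_specific_annotation_v2_alt (raw_ogs : List String) (best_og : String) (eggnog2rxns : List (String × List String)) : String :=
  if pvHasKey eggnog2rxns best_og then best_og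
  else pvOnePass eggnog2rxns best_og raw_ogs none none

-- ===== PRECONDITION & SPEC =====
-- Pre_ excludes inputs where some og of raw_ogs contains no '@' while best_og is unannotated:
-- there Python A raises IndexError at the first such og — unless an earlier specific hit
-- returns first (B behaves identically there), but that crash boundary is not closed-form,
-- so those few returning inputs are excluded together with the crashing ones.
def Pre_select_most_specific_annotation_v2 (raw_ogs : List String) (best_og : String) (eggnog2rxns : List (String × List String)) : Prop :=
  eggnog2rxns.any (fun kv => kv.1 == best_og) = true ∨
  ∀ og ∈ raw_ogs, 2 ≤ ((PySem.Str.split? og "@").getD []).length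
instance (raw_ogs : List String) (best_og : String) (eggnog2rxns : List (String × List String)) : Decidable (Pre_select_most_specific_annotation_v2 raw_ogs best_og eggnog2rxns) := by unfold Pre_select_most_specific_annotation_v2; infer_instance

def pvWitness_select_most_specific_annotation_v2 : List String × String × (List (String × List String)) :=
  (["COG12@NOG", "X@bactNOG", "Y@NOG"], "best", [("ENOG41X", ["r1"]), ("COG12", [])])

def Spec_select_most_specific_annotation_v2 (raw_ogs : List String) (best_og : String) (eggnog2rxns : List (String × List String)) (out : String) : Prop := out = select_most_specific_annotation_v2_alt raw_ogs best_og eggnog2rxns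
instance (raw_ogs : List String) (best_og : String) (eggnog2rxns : List (String × List String)) (out : String) : Decidable (Spec_select_most_specific_annotation_v2 raw_ogs best_og eggnog2rxns out) := by unfold Spec_select_most_specific_annotation_v2; infer_instance

-- ===== CLAIM (what is proved, stated in full; the proofs are below) =====
def Claim_equal_select_most_specific_annotation_v2 : Prop := ∀ (raw_ogs : List String) (best_og : String) (eggnog2rxns : List (String × List String)), Dom_select_most_specific_annotation_v2 raw_ogs best_og eggnog2rxns → Pre_select_most_specific_annotation_v2 raw_ogs best_og eggnog2rxns → Spec_select_most_specific_annotation_v2 raw_ogs best_og eggnog2rxns (select_most_specific_annotation_v2 raw_ogs best_og eggnog2rxns)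

-- ===== LEMMAS AND PROOFS =====
-- The one-pass loop equals A's three-pass cascade, generalized over the two fallbacks.
theorem pvOnePass_eq (eg : List (String × List String)) (b : String) :
    ∀ (l : List String) (k c : Option String),
    pvOnePass eg b l k c =
      match pvFindSpec eg l with
      | some v => v
      | none =>
        match (match k with | some v => some v | none => pvFindKing eg l) with
        | some v => v
        | none =>
          match (match c with | some v => some v | none => pvFindCog eg l) with
          | some v => v
          | none => b := by
  intro l
  induction l with
  | nil =>
    intro k c
    simp only [pvOnePass, pvFindSpec, pvFindKing, pvFindCog]
    cases k <;> cases c <;> rfl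
  | cons og rest ih =>
    intro k c
    simp only [pvOnePass, pvFindSpec, pvFindKing, pvFindCog]
    by_cases hcog : PySem.Str.startswith (PySem.List.pyGetD ((PySem.Str.split? og "@").getD []) 0 "") "COG" = true
    · simp only [hcog, if_true, Bool.not_true, Bool.false_and, ih]
      by_cases hk : pvHasKey eg (PySem.List.pyGetD ((PySem.Str.split? og "@").getD []) 0 "") = true
      · simp only [hk, Bool.and_true]
        cases c <;> simp
      · simp only [hk, Bool.and_false]
        cases c <;> simp
    · simp only [hcog, Bool.not_false, Bool.true_and]
      by_cases hlev : ((PySem.List.pyGetD ((PySem.Str.split? og "@").getD []) 1 "" == "bactNOG"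
          || PySem.List.pyGetD ((PySem.Str.split? og "@").getD []) 1 "" == "euNOG")
          || PySem.List.pyGetD ((PySem.Str.split? og "@").getD []) 1 "" == "arNOG") = true
      · simp only [hlev, if_true, Bool.not_true, Bool.false_and, Bool.true_and, ih]
        by_cases hk : pvHasKey eg ("ENOG41" ++ PySem.List.pyGetD ((PySem.Str.split? og "@").getD []) 0 "") = true
        · simp only [hk, if_true]
          cases k <;> simp
        · simp only [hk]
          cases k <;> simp
      · simp only [hlev, Bool.not_false, Bool.true_and, Bool.false_and]
        by_cases hk : pvHasKey eg ("ENOG41" ++ PySem.List.pyGetD ((PySem.Str.split? og "@").getD []) 0 "") = true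
        · simp [hk]
        · simp [hk, ih]

-- ===== VERDICT (by name: the statement is the Claim_ definition above) =====
theorem select_most_specific_annotation_v2_spec : Claim_equal_select_most_specific_annotation_v2 := by
  intro raw_ogs best_og eg _ _
  unfold Spec_select_most_specific_annotation_v2
  unfold select_most_specific_annotation_v2 select_most_specific_annotation_v2_alt
  by_cases h : pvHasKey eg best_og = true
  · simp [h]
  · simp only [h, pvOnePass_eq]
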